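-- pv_equiv track=rewrite | github.com/2opk/mastudio | src/postprocessing.py | latest_prompt
-- ===== SOURCE A (Python) =====
-- from typing import Dict, List, Optional, Tuple
--
-- def latest_prompt(history: List[Dict[str, str]], role_key: str) -> Optional[str]:
--     key = role_key.lower()
--     for item in reversed(history):
--         if item.get("role", "").lower() == key:
--             return item.get("content", "")
--     for item in reversed(history):
--         if key in item.get("role", "").lower():
--             return item.get("content", "")
--     return None
-- ===== SOURCE B (Python) =====
-- _SENTINEL = object()
--
-- def latest_prompt(history, role_key):
--     key = role_key.lower()
--     exact = sub = _SENTINEL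
--     for item in history:
--         role = item.get("role", "").lower()
--         content = item.get("content", "")
--         if role == key:
--             exact = content
--         if key in role:
--             sub = content
--     if exact is not _SENTINEL:
--         return exact
--     if sub is not _SENTINEL:
--         return sub
--     return None
-- ===== Notes on version B (the rewrite author's own statement) =====
-- stated objective: alternative
-- what changed: Replaces A's two reversed scans with early return by a single forward pass keeping sentinel-initialised 'latest exact match' and 'latest substring match' candidates, resolved after the loop.
import Mathlib
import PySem

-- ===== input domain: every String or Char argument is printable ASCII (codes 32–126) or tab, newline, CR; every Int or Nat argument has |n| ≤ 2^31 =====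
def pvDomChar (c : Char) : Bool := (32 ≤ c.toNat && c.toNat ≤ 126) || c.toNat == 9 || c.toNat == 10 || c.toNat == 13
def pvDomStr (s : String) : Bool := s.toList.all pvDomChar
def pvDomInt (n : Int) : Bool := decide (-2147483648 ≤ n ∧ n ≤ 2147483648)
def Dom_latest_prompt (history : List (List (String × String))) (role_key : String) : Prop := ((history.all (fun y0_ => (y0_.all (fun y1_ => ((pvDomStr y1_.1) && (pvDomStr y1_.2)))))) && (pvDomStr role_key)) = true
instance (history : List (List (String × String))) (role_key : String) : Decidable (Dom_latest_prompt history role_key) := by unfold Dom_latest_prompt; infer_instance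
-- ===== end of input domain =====

-- B replaces A's two reversed early-return scans by one forward pass keeping two
-- sentinel candidates (latest exact role match, latest substring match); same cost.

-- item.get(k, "") on the association-list encoding of a dict (first match)
def pvGet (item : List (String × String)) (k : String) : String :=
  match item.find? (fun p => p.1 == k) with
  | some p => p.2
  | none => ""

-- ===== PORT A =====
-- first reversed loop of A: exact role match, early return
def pvLoopExact (key : String) : List (List (String × String)) → Option String
  | [] => none
  | item :: rest =>
    if PySem.Str.lower (pvGet item "role") == key then some (pvGet item "content")
    else pvLoopExact key rest

-- second reversed loop of A: substring match, early return
def pvLoopSub (key : String) : List (List (String × String)) → Option String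
  | [] => none
  | item :: rest =>
    if PySem.Str.isIn key (PySem.Str.lower (pvGet item "role")) then some (pvGet item "content")
    else pvLoopSub key rest

def latest_prompt (history : List (List (String × String))) (role_key : String) : Option String :=
  let key := PySem.Str.lower role_key
  match pvLoopExact key history.reverse with
  | some c => some c
  | none => pvLoopSub key history.reverse

-- ===== PORT B =====
-- one forward pass; the two Options are the sentinel-initialised candidates
def pvStep (key : String) (acc : Option String × Option String)
    (item : List (String × String)) : Option String × Option String :=
  let role := PySem.Str.lower (pvGet item "role")
  let content := pvGet item "content"
  let acc1 := if role == key then (some content, acc.2) else acc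
  if PySem.Str.isIn key role then (acc1.1, some content) else acc1

def latest_prompt_alt (history : List (List (String × String))) (role_key : String) : Option String :=
  let key := PySem.Str.lower role_key
  let r := history.foldl (pvStep key) (none, none)
  match r.1 with
  | some c => some c
  | none => r.2

-- ===== PRECONDITION & SPEC =====
def Spec_latest_prompt (history : List (List (String × String))) (role_key : String) (out : Option String) : Prop := out = latest_prompt_alt history role_key
instance (history : List (List (String × String))) (role_key : String) (out : Option String) : Decidable (Spec_latest_prompt history role_key out) := by unfold Spec_latest_prompt; infer_instance

-- ===== CLAIM (what is proved, stated in full; the proofs are below) =====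
def Claim_equal_latest_prompt : Prop := ∀ (history : List (List (String × String))) (role_key : String), Dom_latest_prompt history role_key → Spec_latest_prompt history role_key (latest_prompt history role_key)

-- ===== LEMMAS AND PROOFS =====

-- B's fold computes exactly (A's first loop on the reverse, A's second loop on the reverse)
theorem pvFold_eq (key : String) (history : List (List (String × String))) :
    history.foldl (pvStep key) (none, none)
      = (pvLoopExact key history.reverse, pvLoopSub key history.reverse) := by
  induction history using List.reverseRecOn with
  | nil => simp [pvLoopExact, pvLoopSub]
  | append_singleton xs x ih =>
    simp only [List.foldl_append, List.foldl_cons, List.foldl_nil, ih,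
      List.reverse_append, List.reverse_cons, List.reverse_nil, List.nil_append,
      List.cons_append, pvLoopExact, pvLoopSub, pvStep]
    by_cases h1 : PySem.Str.lower (pvGet x "role") == key <;>
      simp only [h1, if_true, if_false, Bool.false_eq_true] <;> split_ifs <;> rfl

-- ===== VERDICT (by name: the statement is the Claim_ definition above) =====
theorem latest_prompt_spec : Claim_equal_latest_prompt := by
  intro history role_key _
  simp only [Spec_latest_prompt, latest_prompt, latest_prompt_alt, pvFold_eq]
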